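-- pv_equiv track=rewrite | github.com/sbalian/aoc2023 | 09/run.py | previous_value
-- ===== SOURCE A (Python) =====
-- def previous_value(triangle):
--     values = []
--     for d in range(len(triangle) - 1, -1, -1):
--         if d == len(triangle) - 1:
--             values.append(0)
--         else:
--             values.append(triangle[d][0] - values[len(triangle) - d - 2])
--     return values[-1]
-- ===== SOURCE B (Python) =====
-- def previous_value(triangle):
--     if len(triangle) == 1:
--         return 0
--     return triangle[0][0] - previous_value(triangle[1:])
-- ===== Notes on version B (the rewrite author's own statement) =====
-- stated objective: simpler
-- what changed: Replaces the bottom-up loop that appends to an indexed values list over a descending range with a direct top-down recursion triangle[0][0] - previous_value(triangle[1:]).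
import Mathlib
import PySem

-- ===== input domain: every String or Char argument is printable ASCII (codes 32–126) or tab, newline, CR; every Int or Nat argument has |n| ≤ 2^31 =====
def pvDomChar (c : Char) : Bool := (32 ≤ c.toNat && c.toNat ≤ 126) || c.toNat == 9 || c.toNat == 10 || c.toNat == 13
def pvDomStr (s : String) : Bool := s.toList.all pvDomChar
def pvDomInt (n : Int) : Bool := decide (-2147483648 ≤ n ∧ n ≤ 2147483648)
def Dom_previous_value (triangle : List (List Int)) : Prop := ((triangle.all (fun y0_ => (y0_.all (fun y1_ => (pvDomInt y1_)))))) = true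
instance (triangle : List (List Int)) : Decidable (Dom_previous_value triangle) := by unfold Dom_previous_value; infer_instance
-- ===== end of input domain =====

-- B replaces A's bottom-up values-list loop with a direct top-down recursion (simpler decomposition, same values).

-- ===== PORT A =====
-- A's loop body: one step of 'for d in range(len(triangle)-1, -1, -1)'
def pvStepA (triangle : List (List Int)) (values : List Int) (d : Int) : List Int :=
  if d = (triangle.length : Int) - 1 then
    values ++ [0]
  else
    values ++ [(PySem.List.pyGet? ((PySem.List.pyGet? triangle d).getD []) 0).getD 0
               - (PySem.List.pyGet? values ((triangle.length : Int) - d - 2)).getD 0]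

def previous_value (triangle : List (List Int)) : Int :=
  let values := (PySem.List.pyRange ((triangle.length : Int) - 1) (-1) (-1)).foldl (pvStepA triangle) []
  (PySem.List.pyGet? values (-1)).getD 0

-- ===== PORT B =====
def previous_value_alt : List (List Int) → Int
  | [] => 0              -- Python raises IndexError here; excluded by Pre_
  | [_] => 0
  | row :: r2 :: rest => (PySem.List.pyGet? row 0).getD 0 - previous_value_alt (r2 :: rest)

-- ===== PRECONDITION & SPEC =====
-- Pre_ excludes exactly the inputs where Python A raises IndexError: an empty triangle,
-- or an empty row among all rows but the last (the last row's entries are never read).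
def Pre_previous_value (triangle : List (List Int)) : Prop :=
  triangle ≠ [] ∧ ∀ row ∈ triangle.dropLast, row ≠ []
instance (triangle : List (List Int)) : Decidable (Pre_previous_value triangle) := by
  unfold Pre_previous_value; infer_instance

def pvWitness_previous_value : List (List Int) := [[10, 13, 16], [3, 3], [0]]

def Spec_previous_value (triangle : List (List Int)) (out : Int) : Prop := out = previous_value_alt triangle
instance (triangle : List (List Int)) (out : Int) : Decidable (Spec_previous_value triangle out) := by unfold Spec_previous_value; infer_instance

-- ===== CLAIM (what is proved, stated in full; the proofs are below) =====
def Claim_equal_previous_value : Prop := ∀ (triangle : List (List Int)), Dom_previous_value triangle → Pre_previous_value triangle → Spec_previous_value triangle (previous_value triangle)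

-- ===== LEMMAS AND PROOFS =====

-- a singleton triangle extrapolates to 0
theorem alt_singleton (r : List Int) : previous_value_alt [r] = 0 := rfl

-- unfolding B on a triangle with at least two rows
theorem alt_cons (row r2 : List Int) (rest : List (List Int)) :
    previous_value_alt (row :: r2 :: rest)
      = (PySem.List.pyGet? row 0).getD 0 - previous_value_alt (r2 :: rest) := rfl

-- one else-branch step of A's loop at d = k (k ≤ n-2): it appends B's value on the
-- suffix starting at row k, read off from the accumulator's last entry
theorem stepA_spec (triangle : List (List Int)) (k : Nat) (hk : k + 1 < triangle.length)
    (acc : List Int) (hlen : acc.length = triangle.length - 1 - k)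
    (hlast : acc.getLast? = some (previous_value_alt (triangle.drop (k + 1)))) :
    (pvStepA triangle acc (k : Int)).length = triangle.length - k ∧
      (pvStepA triangle acc (k : Int)).getLast?
        = some (previous_value_alt (triangle.drop k)) := by
  unfold pvStepA
  rw [if_neg (by omega)]
  refine ⟨by simp [hlen]; omega, ?_⟩
  rw [List.getLast?_concat]
  have hget := PySem.List.pyGet?_of_nonneg (xs := acc)
    (i := (triangle.length : Int) - (k : Int) - 2) (by omega)
  rw [hget]
  have hidx : ((triangle.length : Int) - (k : Int) - 2).toNat = acc.length - 1 := by omega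
  rw [hidx, ← List.getLast?_eq_getElem?, hlast]
  have hd : triangle.drop k = triangle[k] :: triangle.drop (k + 1) := by
    rw [List.drop_eq_getElem_cons (by omega)]
  obtain ⟨r2, rest', hr⟩ : ∃ r2 rest', triangle.drop (k + 1) = r2 :: rest' := by
    cases hdd : triangle.drop (k + 1) with
    | nil =>
      exfalso
      have := List.length_drop (l := triangle) (i := k + 1)
      rw [hdd] at this; simp at this; omega
    | cons a b => exact ⟨a, b, rfl⟩
  rw [hd, hr, alt_cons, ← hr]
  rw [PySem.List.pyGet?_natCast]
  simp [List.getElem?_eq_getElem (by omega : k < triangle.length)]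

-- the loop invariant: after processing d = n-1 … k+1, the accumulator's last element is
-- B's value on the suffix dropped at k+1; folding the remaining countdown [k, …, 0] ends
-- with B's value on the whole triangle as the last element.
theorem loopA (triangle : List (List Int)) (k : Nat) (hk : k + 1 < triangle.length)
    (acc : List Int) (hlen : acc.length = triangle.length - 1 - k)
    (hlast : acc.getLast? = some (previous_value_alt (triangle.drop (k + 1)))) :
    ((PySem.List.pyRange (k : Int) (-1) (-1)).foldl (pvStepA triangle) acc).getLast?
      = some (previous_value_alt triangle) := by
  induction k generalizing acc with
  | zero =>
    rw [PySem.List.pyRange_neg_one_cons (by norm_num),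
        PySem.List.pyRange_neg_one_eq_nil (by norm_num)]
    simp only [List.foldl_cons, List.foldl_nil]
    have := (stepA_spec triangle 0 hk acc hlen hlast).2
    simpa using this
  | succ k ih =>
    rw [PySem.List.pyRange_neg_one_cons (by omega)]
    simp only [List.foldl_cons]
    rw [show ((k + 1 : Nat) : Int) - 1 = ((k : Nat) : Int) by push_cast; ring]
    obtain ⟨h1, h2⟩ := stepA_spec triangle (k + 1) hk acc hlen hlast
    exact ih (by omega) _ (by omega) h2

theorem previous_value_spec : Claim_equal_previous_value := by
  intro triangle _ hpre
  obtain ⟨hne, -⟩ := hpre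
  unfold Spec_previous_value previous_value
  cases triangle with
  | nil => exact absurd rfl hne
  | cons row rest =>
    have hlen : ((row :: rest).length : Int) - 1 = ((rest.length : Nat) : Int) := by simp
    rw [hlen, PySem.List.pyRange_neg_one_cons (by omega)]
    simp only [List.foldl_cons]
    have hfirst : pvStepA (row :: rest) [] ((rest.length : Nat) : Int) = [0] := by
      unfold pvStepA
      rw [if_pos (by simp)]
      rfl
    rw [hfirst]
    cases rest with
    | nil =>
      rw [show ((([] : List (List Int)).length : Nat) : Int) - 1 = -1 by simp,
          PySem.List.pyRange_neg_one_eq_nil (by norm_num)]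
      simp [PySem.List.pyGet?_neg_one, alt_singleton]
    | cons r2 rest' =>
      have h1 : (((r2 :: rest').length : Nat) : Int) - 1 = (((r2 :: rest').length - 1 : Nat) : Int) := by
        simp only [List.length_cons]; omega
      rw [h1]
      have hlast : ((PySem.List.pyRange ((((r2 :: rest').length - 1 : Nat)) : Int) (-1) (-1)).foldl
          (pvStepA (row :: r2 :: rest')) [0]).getLast?
            = some (previous_value_alt (row :: r2 :: rest')) := by
        apply loopA (row :: r2 :: rest') ((r2 :: rest').length - 1) (by simp) [0] (by simp)
        have hdl : (row :: r2 :: rest').drop ((r2 :: rest').length - 1 + 1)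
            = [(r2 :: rest').getLast (by simp)] := by
          rw [show (r2 :: rest').length - 1 + 1 = (r2 :: rest').length by simp]
          rw [List.drop_length_cons (by simp)]
        rw [hdl, alt_singleton]
        simp
      rw [PySem.List.pyGet?_neg_one, hlast]
      rfl
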